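-- pv_equiv track=rewrite | github.com/981377660LMT/algorithm-study | 19_数学/容斥原理/F - Shift Table-约数系容斥原理.py | shiftTable
-- ===== SOURCE A (Python) =====
-- from typing import List
--
-- MOD = 998244353
--
-- def shiftTable(work: List[bool]) -> int:
--     n = len(work)
--     res = [0] * n
--     for fac in range(1, n):
--         if not n % fac:
--             continue
--         cur = 1
--         for i in range(n):
--             if all(work[k] for k in range(i, n, fac)):
--                 cur *= 2  # 这一天可以休息
--                 cur %= MOD
--         res[fac] += cur
--
--         # !减去重复计算的
--         for j in range(2 * fac, n, fac):
--             if not n % j: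
--                 continue
--             res[fac] -= res[j]
--             res[fac] %= MOD
--
--     return sum(res) % MOD
-- ===== SOURCE B (Python) =====
-- from typing import List
--
-- MOD = 998244353
--
-- def shiftTable(work: List[bool]) -> int:
--     n = len(work)
--     total = 0
--     for fac in range(1, n):
--         if n % fac == 0:
--             continue
--         # suffix DP: good[i] == all(work[k] for k in range(i, n, fac)), in O(n)
--         cnt = 0
--         good = []  # good[t] corresponds to day n-1-t (built back to front)
--         for i in range(n - 1, -1, -1):
--             g = work[i] and (good[len(good) - fac] if len(good) >= fac else True)
--             good.append(g)
--             if g: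
--                 cnt += 1
--         total = (total + pow(2, cnt, MOD)) % MOD
--     return total
-- ===== Notes on version B (the rewrite author's own statement) =====
-- stated objective: faster
-- what changed: Replaces the per-start rescan all(work[k] for k in range(i,n,fac)) (O(n^2/fac) per fac) by an O(n) backward suffix DP good[i]=work[i] and good[i+fac] per fac, counts the good days once, and uses pow(2,cnt,MOD); it also drops A's subtraction loop, which provably subtracts only zeros (res[j] for j>fac is still 0 when fac is processed in ascending order).
import Mathlib
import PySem

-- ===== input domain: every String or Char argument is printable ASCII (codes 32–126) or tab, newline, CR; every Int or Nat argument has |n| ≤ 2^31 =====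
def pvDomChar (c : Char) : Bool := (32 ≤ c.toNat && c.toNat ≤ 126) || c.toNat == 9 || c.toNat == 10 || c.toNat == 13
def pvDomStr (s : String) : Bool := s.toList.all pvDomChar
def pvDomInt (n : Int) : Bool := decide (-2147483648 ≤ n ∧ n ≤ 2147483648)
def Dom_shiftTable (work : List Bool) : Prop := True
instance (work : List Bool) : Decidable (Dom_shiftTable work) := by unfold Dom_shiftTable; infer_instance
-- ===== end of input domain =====

-- B replaces A's per-start rescan of each arithmetic chain by an O(n) backward suffix DP per fac
-- (and drops A's subtraction loop, which only ever subtracts entries that are still 0): faster.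

-- ===== PORT A =====
def pvMOD : Int := 998244353

-- res[i] read/write with a nonnegative in-range index (all indices A uses are such)
def pvGet (xs : List Int) (i : Int) : Int := PySem.List.pyGetD xs i 0
def pvSet (xs : List Int) (i : Int) (v : Int) : List Int := xs.set i.toNat v

-- the 'cur' loop: for i in range(n): if all(work[k] for k in range(i, n, fac)): cur = cur*2 % MOD
def shiftInner (work : List Bool) (n fac : Int) : Int :=
  (PySem.List.pyRange 0 n 1).foldl (fun cur i =>
    if (PySem.List.pyRange i n fac).all (fun k => PySem.List.pyGetD work k false) then
      PySem.Int.mod (cur * 2) pvMOD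
    else cur) 1

-- one iteration of A's outer 'for fac in range(1, n)' loop body
def shiftStep (work : List Bool) (n : Int) (res : List Int) (fac : Int) : List Int :=
  if PySem.Int.mod n fac == 0 then res
  else
    let cur := shiftInner work n fac
    let res := pvSet res fac (pvGet res fac + cur)
    (PySem.List.pyRange (2 * fac) n fac).foldl (fun res j =>
      if PySem.Int.mod n j == 0 then res
      else pvSet res fac (PySem.Int.mod (pvGet res fac - pvGet res j) pvMOD)) res

def shiftTable (work : List Bool) : Int :=
  let n : Int := PySem.List.len work
  let res : List Int := List.replicate n.toNat 0
  let res := (PySem.List.pyRange 1 n 1).foldl (shiftStep work n) res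
  PySem.Int.mod res.sum pvMOD

-- ===== PORT B =====
-- the suffix-DP loop of Source B: for i in range(n-1, -1, -1): g = work[i] and (...); good.append(g); …
-- Source B appends to 'good' and reads good[len(good)-fac]; here 'good' is kept most-recent-first
-- (cons instead of append), so that same element is good[fac-1].
def altInner (work : List Bool) (n fac : Int) : Int × List Bool :=
  (PySem.List.pyRange (n - 1) (-1) (-1)).foldl
    (fun (st : Int × List Bool) i =>
      let cnt := st.1
      let good := st.2
      let g := PySem.List.pyGetD work i false &&
        (if fac ≤ PySem.List.len good then PySem.List.pyGetD good (fac - 1) true else true)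
      (if g then cnt + 1 else cnt, g :: good)) ((0 : Int), ([] : List Bool))

-- one iteration of Source B's outer loop body: total = (total + pow(2, cnt, MOD)) % MOD
-- (cnt counts up from 0, so it is nonnegative and .toNat is exact)
def altStep (work : List Bool) (n : Int) (total fac : Int) : Int :=
  if PySem.Int.mod n fac == 0 then total
  else PySem.Int.mod (total + PySem.Int.powMod 2 (altInner work n fac).1.toNat pvMOD) pvMOD

def shiftTable_alt (work : List Bool) : Int :=
  let n : Int := PySem.List.len work
  (PySem.List.pyRange 1 n 1).foldl (altStep work n) 0

-- ===== PRECONDITION & SPEC =====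
def Spec_shiftTable (work : List Bool) (out : Int) : Prop := out = shiftTable_alt work
instance (work : List Bool) (out : Int) : Decidable (Spec_shiftTable work out) := by unfold Spec_shiftTable; infer_instance

-- ===== CLAIM (what is proved, stated in full; the proofs are below) =====
def Claim_equal_shiftTable : Prop := ∀ (work : List Bool), Dom_shiftTable work → Spec_shiftTable work (shiftTable work)

-- ===== LEMMAS AND PROOFS =====

-- `all work[k] for k in range(i, n, fac)` — the predicate both sides count
def chainAll (work : List Bool) (n fac i : Int) : Bool :=
  (PySem.List.pyRange i n fac).all (fun k => PySem.List.pyGetD work k false)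

-- the per-fac summand both programs produce
def curN (work : List Bool) (n fac : Int) : Int :=
  PySem.Int.mod (2 ^ ((PySem.List.pyRange 0 n 1).countP (chainAll work n fac))) pvMOD

theorem pvMOD_pos : (0 : Int) < pvMOD := by decide

-- range(a, b, s) with positive step: nil / cons unfolding
theorem pyRange_pos_nil (a b s : Int) (hs : 0 < s) (h : b ≤ a) :
    PySem.List.pyRange a b s = [] := by
  rw [PySem.List.pyRange_of_pos _ _ hs]
  rw [if_neg (by omega)]
  simp

theorem pyRange_pos_cons (a b s : Int) (hs : 0 < s) (h : a < b) :
    PySem.List.pyRange a b s = a :: PySem.List.pyRange (a + s) b s := by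
  rw [PySem.List.pyRange_of_pos _ _ hs, PySem.List.pyRange_of_pos _ _ hs]
  rw [if_pos h]
  by_cases h2 : a + s < b
  · rw [if_pos h2]
    have key : (b - a + s - 1) / s = (b - (a + s) + s - 1) / s + 1 := by
      have : b - a + s - 1 = (b - (a + s) + s - 1) + 1 * s := by ring
      rw [this, Int.add_mul_ediv_right _ _ (by omega)]
    have hq : 0 ≤ (b - (a + s) + s - 1) / s := Int.ediv_nonneg (by omega) (by omega)
    rw [key]
    have : ((b - (a + s) + s - 1) / s + 1).toNat = ((b - (a + s) + s - 1) / s).toNat + 1 := by omega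
    rw [this, List.range_succ_eq_map]
    simp [Function.comp]
    intro k _
    ring
  · rw [if_neg h2]
    have h1 : (b - a + s - 1) / s = 1 := by
      have := PySem.Int.floordiv_eq_ediv_of_pos (a := b - a + s - 1) hs
      rw [← this, PySem.Int.floordiv_eq_iff_of_pos hs]
      omega
    rw [h1]
    simp

-- the suffix recurrence of chainAll
theorem chainAll_rec (work : List Bool) (fac i : Int) (hf : 0 < fac)
    (h1 : i < (work.length : Int)) :
    chainAll work (work.length : Int) fac i =
      (PySem.List.pyGetD work i false && chainAll work (work.length : Int) fac (i + fac)) := by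
  unfold chainAll
  rw [pyRange_pos_cons _ _ _ hf h1]
  simp

theorem chainAll_of_ge (work : List Bool) (fac i : Int) (hf : 0 < fac)
    (h : (work.length : Int) ≤ i) : chainAll work (work.length : Int) fac i = true := by
  unfold chainAll
  rw [pyRange_pos_nil _ _ _ hf h]
  rfl

-- the doubling loop computes 2^(count) mod MOD
theorem inner_doubling' (l : List Int) (p : Int → Bool) (c : Int) (h0 : 0 ≤ c) (h1 : c < pvMOD) :
    l.foldl (fun cur i => if p i then (cur * 2) % pvMOD else cur) c
      = (c * 2 ^ (l.countP p)) % pvMOD := by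
  induction l generalizing c with
  | nil => simp [Int.emod_eq_of_lt h0 h1]
  | cons x t ih =>
    simp only [List.foldl_cons, List.countP_cons]
    by_cases hx : p x
    · rw [if_pos hx, if_pos hx]
      have hm : (0:Int) < pvMOD := by decide
      rw [ih _ (Int.emod_nonneg _ (by decide)) (Int.emod_lt_of_pos _ hm)]
      rw [Int.mul_emod, Int.emod_emod_of_dvd _ (dvd_refl _), ← Int.mul_emod]
      ring_nf
    · rw [if_neg hx, if_neg hx, ih _ h0 h1]
      simp

theorem inner_doubling (l : List Int) (p : Int → Bool) (c : Int) (h0 : 0 ≤ c) (h1 : c < pvMOD) :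
    l.foldl (fun cur i => if p i then PySem.Int.mod (cur * 2) pvMOD else cur) c
      = PySem.Int.mod (c * 2 ^ (l.countP p)) pvMOD := by
  simp only [PySem.Int.mod_eq_emod_of_pos (by decide : (0:Int) < pvMOD)]
  exact inner_doubling' l p c h0 h1

theorem shiftInner_eq (work : List Bool) (fac : Int) :
    shiftInner work (work.length : Int) fac = curN work (work.length : Int) fac := by
  unfold shiftInner curN
  have h := inner_doubling (PySem.List.pyRange 0 (work.length : Int) 1)
    (chainAll work (work.length : Int) fac) 1 (by decide) (by decide)
  rw [one_mul] at h
  exact h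

-- B's backward DP builds exactly the list of chainAll values and their count
theorem altInner_step (work : List Bool) (fac : Int) (hf : 1 ≤ fac) (t : Nat)
    (ht : t < work.length) (c : Int)
    (hc : c = ((PySem.List.pyRange ((t : Int) + 1) (work.length : Int) 1).countP
                 (chainAll work (work.length : Int) fac) : Nat)) :
    (fun (st : Int × List Bool) i =>
      let cnt := st.1
      let good := st.2
      let g := PySem.List.pyGetD work i false &&
        (if fac ≤ PySem.List.len good then PySem.List.pyGetD good (fac - 1) true else true)
      (if g then cnt + 1 else cnt, g :: good))
      (c, (PySem.List.pyRange ((t : Int) + 1) (work.length : Int) 1).map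
            (chainAll work (work.length : Int) fac)) (t : Int)
    = ((((PySem.List.pyRange (t : Int) (work.length : Int) 1).countP
           (chainAll work (work.length : Int) fac) : Nat) : Int),
       (PySem.List.pyRange (t : Int) (work.length : Int) 1).map
         (chainAll work (work.length : Int) fac)) := by
  have hn : (t : Int) < (work.length : Int) := by exact_mod_cast ht
  have hcons := PySem.List.pyRange_one_cons hn
  have hlen : PySem.List.len ((PySem.List.pyRange ((t : Int) + 1) (work.length : Int) 1).map
      (chainAll work (work.length : Int) fac)) = (work.length : Int) - ((t : Int) + 1) := by
    simp [PySem.List.len_eq, PySem.List.length_pyRange_one]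
    omega
  have hg : (PySem.List.pyGetD work (t : Int) false &&
      (if fac ≤ (work.length : Int) - ((t : Int) + 1) then
        PySem.List.pyGetD ((PySem.List.pyRange ((t : Int) + 1) (work.length : Int) 1).map
          (chainAll work (work.length : Int) fac)) (fac - 1) true
      else true)) = chainAll work (work.length : Int) fac (t : Int) := by
    by_cases hcase : fac ≤ (work.length : Int) - ((t : Int) + 1)
    · rw [if_pos hcase]
      have hidx0 : (0 : Int) ≤ fac - 1 := by omega
      have hidx1 : fac - 1 < (((PySem.List.pyRange ((t : Int) + 1) (work.length : Int) 1).map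
          (chainAll work (work.length : Int) fac)).length : Int) := by
        simp [PySem.List.length_pyRange_one]
        omega
      rw [PySem.List.pyGetD_eq_getElem _ _ hidx0 hidx1]
      rw [List.getElem_map]
      rw [PySem.List.getElem_pyRange_one]
      have harg : (t : Int) + 1 + ((fac - 1).toNat : Int) = (t : Int) + fac := by omega
      rw [harg]
      rw [chainAll_rec work fac (t : Int) (by omega) hn]
    · rw [if_neg hcase]
      rw [chainAll_rec work fac (t : Int) (by omega) hn]
      rw [chainAll_of_ge work fac ((t : Int) + fac) (by omega) (by omega)]
  simp only [hlen, hg]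
  rw [hcons]
  simp only [List.map_cons, List.countP_cons, hc]
  simp only [Prod.mk.injEq]
  refine ⟨?_, trivial⟩
  split_ifs with hF <;> push_cast <;> ring

theorem altInner_gen (work : List Bool) (fac : Int) (hf : 1 ≤ fac) (t : Nat)
    (ht : t ≤ work.length) :
    (PySem.List.pyRange ((t : Int) - 1) (-1) (-1)).foldl
      (fun (st : Int × List Bool) i =>
        let cnt := st.1
        let good := st.2
        let g := PySem.List.pyGetD work i false &&
          (if fac ≤ PySem.List.len good then PySem.List.pyGetD good (fac - 1) true else true)
        (if g then cnt + 1 else cnt, g :: good))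
      ((((PySem.List.pyRange (t : Int) (work.length : Int) 1).countP
           (chainAll work (work.length : Int) fac) : Nat) : Int),
       (PySem.List.pyRange (t : Int) (work.length : Int) 1).map
         (chainAll work (work.length : Int) fac))
    = ((((PySem.List.pyRange 0 (work.length : Int) 1).countP
           (chainAll work (work.length : Int) fac) : Nat) : Int),
       (PySem.List.pyRange 0 (work.length : Int) 1).map
         (chainAll work (work.length : Int) fac)) := by
  induction t with
  | zero =>
    rw [PySem.List.pyRange_neg_one_eq_nil (by omega)]
    simp
  | succ m ih =>
    have hm : m < work.length := by omega
    have h1 : ((m + 1 : Nat) : Int) - 1 = (m : Int) := by push_cast; ring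
    have h2 : ((m + 1 : Nat) : Int) = (m : Int) + 1 := by push_cast; ring
    rw [h1, h2, PySem.List.pyRange_neg_one_cons (by omega : (-1 : Int) < (m : Int))]
    rw [List.foldl_cons]
    refine Eq.trans ?_ (ih (by omega))
    exact congrArg (fun st => List.foldl _ st (PySem.List.pyRange ((m : Int) - 1) (-1) (-1)))
      (altInner_step work fac hf m hm _ rfl)

theorem altInner_eq (work : List Bool) (fac : Int) (hf : 1 ≤ fac) :
    altInner work (work.length : Int) fac =
      ((((PySem.List.pyRange 0 (work.length : Int) 1).countP
           (chainAll work (work.length : Int) fac) : Nat) : Int),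
       (PySem.List.pyRange 0 (work.length : Int) 1).map (chainAll work (work.length : Int) fac)) := by
  have h := altInner_gen work fac hf work.length (le_refl _)
  unfold altInner
  rw [PySem.List.pyRange_one_eq_nil (le_refl ((work.length : Nat) : Int))] at h
  simpa using h

-- A's outer loop: the subtraction loop subtracts only zeros, so the sum of res
-- accumulates exactly the per-fac summands of the non-divisors
theorem pvGet_eq (xs : List Int) (j : Int) (h0 : 0 ≤ j) (h1 : j < (xs.length : Int)) :
    pvGet xs j = xs[j.toNat]'(by omega) := by
  unfold pvGet
  rw [PySem.List.pyGetD_eq_getElem _ _ h0 h1]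

theorem pvGet_set_self (xs : List Int) (i v : Int) (h0 : 0 ≤ i) (h1 : i < (xs.length : Int)) :
    pvGet (pvSet xs i v) i = v := by
  unfold pvGet pvSet
  rw [PySem.List.pyGetD_eq_getElem _ _ h0 (by rw [List.length_set]; exact h1)]
  exact List.getElem_set_self (by rw [List.length_set]; omega)

theorem pvGet_set_ne (xs : List Int) (i j v : Int) (hi : 0 ≤ i) (h0 : 0 ≤ j)
    (h1 : j < (xs.length : Int)) (hne : i ≠ j) :
    pvGet (pvSet xs i v) j = pvGet xs j := by
  unfold pvGet pvSet
  rw [PySem.List.pyGetD_eq_getElem _ _ h0 (by rw [List.length_set]; exact h1),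
      PySem.List.pyGetD_eq_getElem _ _ h0 h1]
  exact List.getElem_set_ne (by omega) _

theorem sum_pvSet (xs : List Int) (i v : Int) (h0 : 0 ≤ i) (h1 : i < (xs.length : Int)) :
    (pvSet xs i v).sum = xs.sum - pvGet xs i + v := by
  have hlt : i.toNat < xs.length := by omega
  rw [pvGet_eq xs i h0 h1]
  unfold pvSet
  rw [List.sum_set, if_pos hlt]
  have hx := List.sum_take_add_sum_drop xs i.toNat
  rw [List.drop_eq_getElem_cons hlt, List.sum_cons] at hx
  omega

theorem stepA_sum (work : List Bool) (L : List Int) (res : List Int)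
    (hlen : res.length = work.length)
    (hpw : L.Pairwise (· < ·))
    (hmem : ∀ x ∈ L, 1 ≤ x ∧ x < (work.length : Int))
    (hz : ∀ j : Int, (∃ x ∈ L, x ≤ j) → j < (work.length : Int) → pvGet res j = 0) :
    (L.foldl (shiftStep work (work.length : Int)) res).sum =
      res.sum + ((L.filter (fun f => !(PySem.Int.mod (work.length : Int) f == 0))).map
        (curN work (work.length : Int))).sum := by
  induction L generalizing res with
  | nil => simp
  | cons fac L' ih =>
    obtain ⟨hf1, hfn⟩ := hmem fac (List.mem_cons_self ..)
    have hpw' := hpw.tail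
    have hhead : ∀ x ∈ L', fac < x := fun x hx => List.rel_of_pairwise_cons hpw hx
    rw [List.foldl_cons, List.filter_cons]
    by_cases hdiv : PySem.Int.mod (work.length : Int) fac == 0
    · have hstep : shiftStep work (work.length : Int) res fac = res := by
        unfold shiftStep
        rw [if_pos hdiv]
      rw [hstep, if_neg (by simp [hdiv])]
      exact ih res hlen hpw' (fun x hx => hmem x (List.mem_cons_of_mem _ hx))
        (fun j ⟨x, hx, hxj⟩ hj => hz j ⟨x, List.mem_cons_of_mem _ hx, hxj⟩ hj)
    · have hget0 : pvGet res fac = 0 := hz fac ⟨fac, List.mem_cons_self .., le_refl fac⟩ hfn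
      have hcur0 : 0 ≤ curN work (work.length : Int) fac := by
        unfold curN
        rw [PySem.Int.mod_eq_emod_of_pos pvMOD_pos]
        exact Int.emod_nonneg _ (by decide)
      have hcurM : curN work (work.length : Int) fac < pvMOD := by
        unfold curN
        rw [PySem.Int.mod_eq_emod_of_pos pvMOD_pos]
        exact Int.emod_lt_of_pos _ pvMOD_pos
      have hres1 : pvSet res fac (pvGet res fac + shiftInner work (work.length : Int) fac)
          = pvSet res fac (curN work (work.length : Int) fac) := by
        rw [hget0, shiftInner_eq, zero_add]
      -- the subtraction loop never changes res: every res[j] it reads is still 0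
      have hsub : ∀ (J : List Int), (∀ j ∈ J, fac < j ∧ j < (work.length : Int)) →
          J.foldl (fun res j =>
            if PySem.Int.mod (work.length : Int) j == 0 then res
            else pvSet res fac (PySem.Int.mod (pvGet res fac - pvGet res j) pvMOD))
            (pvSet res fac (curN work (work.length : Int) fac))
          = pvSet res fac (curN work (work.length : Int) fac) := by
        intro J hJ
        induction J with
        | nil => rfl
        | cons j J' ihJ =>
          obtain ⟨hj1, hj2⟩ := hJ j (List.mem_cons_self ..)
          rw [List.foldl_cons]
          by_cases hjd : PySem.Int.mod (work.length : Int) j == 0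
          · rw [if_pos hjd]
            exact ihJ (fun x hx => hJ x (List.mem_cons_of_mem _ hx))
          · rw [if_neg hjd]
            have hga : pvGet (pvSet res fac (curN work (work.length : Int) fac)) fac
                = curN work (work.length : Int) fac :=
              pvGet_set_self res fac _ (by omega) (by omega)
            have hgb : pvGet (pvSet res fac (curN work (work.length : Int) fac)) j = 0 := by
              rw [pvGet_set_ne res fac j _ (by omega) (by omega) (by omega) (by omega)]
              exact hz j ⟨fac, List.mem_cons_self .., by omega⟩ hj2
            rw [hga, hgb, sub_zero,
                PySem.Int.mod_eq_emod_of_pos pvMOD_pos, Int.emod_eq_of_lt hcur0 hcurM]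
            unfold pvSet
            rw [List.set_set]
            exact ihJ (fun x hx => hJ x (List.mem_cons_of_mem _ hx))
      have hstep : shiftStep work (work.length : Int) res fac
          = pvSet res fac (curN work (work.length : Int) fac) := by
        unfold shiftStep
        rw [if_neg hdiv]
        simp only []
        rw [hres1]
        apply hsub
        intro j hj
        rw [PySem.List.mem_pyRange_iff_of_pos (by omega)] at hj
        omega
      rw [hstep, if_pos (by simp [hdiv])]
      have hlen1 : (pvSet res fac (curN work (work.length : Int) fac)).length = work.length := by
        unfold pvSet
        rw [List.length_set]
        exact hlen
      rw [ih _ hlen1 hpw' (fun x hx => hmem x (List.mem_cons_of_mem _ hx)) ?_]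
      · rw [sum_pvSet res fac _ (by omega) (by omega), hget0, List.map_cons, List.sum_cons]
        ring
      · intro j ⟨x, hx, hxj⟩ hj
        have hfx := hhead x hx
        rw [pvGet_set_ne res fac j _ (by omega) (by omega) (by omega) (by omega)]
        exact hz j ⟨x, List.mem_cons_of_mem _ hx, hxj⟩ hj

-- B's outer loop: folding modular additions is the mod of the sum
theorem modfold' (p : Int → Bool) (g : Int → Int) (L : List Int) (a : Int)
    (h0 : 0 ≤ a) (h1 : a < pvMOD) :
    L.foldl (fun t f => if p f then t else (t + g f) % pvMOD) a
      = (a + ((L.filter (fun f => !(p f))).map g).sum) % pvMOD := by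
  induction L generalizing a with
  | nil => simp [Int.emod_eq_of_lt h0 h1]
  | cons f L' ih =>
    rw [List.foldl_cons, List.filter_cons]
    by_cases hp : p f
    · rw [if_pos hp, if_neg (by simp [hp]), ih a h0 h1]
    · rw [if_neg hp, if_pos (by simp [hp]), List.map_cons, List.sum_cons,
          ih _ (Int.emod_nonneg _ (by decide)) (Int.emod_lt_of_pos _ pvMOD_pos),
          Int.emod_add_emod, add_assoc]

theorem modfold (p : Int → Bool) (g : Int → Int) (L : List Int) (a : Int)
    (h0 : 0 ≤ a) (h1 : a < pvMOD) :
    L.foldl (fun t f => if p f then t else PySem.Int.mod (t + g f) pvMOD) a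
      = PySem.Int.mod (a + ((L.filter (fun f => !(p f))).map g).sum) pvMOD := by
  simp only [PySem.Int.mod_eq_emod_of_pos pvMOD_pos]
  exact modfold' p g L a h0 h1

-- ===== VERDICT (by name: the statement is the Claim_ definition above) =====
-- Source B's per-fac body, for fac ∈ range(1, n): pow(2, cnt, MOD) is 2^cnt mod MOD with cnt the count
theorem altStep_eq (work : List Bool) (fac : Int) (hf : 1 ≤ fac) (total : Int) :
    altStep work (work.length : Int) total fac
      = (if PySem.Int.mod (work.length : Int) fac == 0 then total
         else PySem.Int.mod (total + curN work (work.length : Int) fac) pvMOD) := by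
  unfold altStep
  by_cases hdiv : PySem.Int.mod (work.length : Int) fac == 0
  · rw [if_pos hdiv, if_pos hdiv]
  · rw [if_neg hdiv, if_neg hdiv]
    rw [altInner_eq work fac hf]
    have : ((((PySem.List.pyRange 0 (work.length : Int) 1).countP
        (chainAll work (work.length : Int) fac) : Nat) : Int)).toNat
        = (PySem.List.pyRange 0 (work.length : Int) 1).countP
            (chainAll work (work.length : Int) fac) := Int.toNat_natCast _
    rw [this]
    rfl

theorem shiftTable_spec : Claim_equal_shiftTable := by
  intro work _
  unfold Spec_shiftTable shiftTable shiftTable_alt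
  simp only [PySem.List.len_eq, Int.toNat_natCast]
  have hA := stepA_sum work (PySem.List.pyRange 1 (work.length : Int) 1)
    (List.replicate work.length 0)
    (List.length_replicate)
    (PySem.List.pairwise_lt_pyRange_one _ _)
    (fun x hx => by rw [PySem.List.mem_pyRange_one] at hx; omega)
    (fun j hj hjn => by
      obtain ⟨x, hx, hxj⟩ := hj
      rw [PySem.List.mem_pyRange_one] at hx
      rw [pvGet_eq _ _ (by omega) (by simp; omega)]
      exact List.getElem_replicate _)
  rw [hA, List.sum_replicate, smul_zero, zero_add]
  rw [PySem.List.foldl_congr_mem _ (altStep work (work.length : Int))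
    (fun t f => if PySem.Int.mod (work.length : Int) f == 0 then t
      else PySem.Int.mod (t + curN work (work.length : Int) f) pvMOD) 0
    (fun acc x hx => by
      rw [PySem.List.mem_pyRange_one] at hx
      exact altStep_eq work x (by omega) acc)]
  rw [modfold _ _ _ 0 (by decide) (by decide), zero_add]
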